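-- pv_equiv track=rewrite | github.com/Difio3333/Python-DAU | main.py | create_phrygian_scale
-- ===== SOURCE A (Python) =====
-- def create_phrygian_scale(note):
-- 	note -= 24
--
-- 	scale=[]
--
-- 	majorscale = [1,2,2,2,1,2,2]
-- 	i = 0
-- 	while i < 5:
-- 		z = 0
-- 		while z < len(majorscale):
-- 			note += majorscale[z]
-- 			scale.append(note)
-- 			z+=1
-- 		i+=1
--
-- 	return scale
-- ===== SOURCE B (Python) =====
-- # The 35 cumulative offsets are input-independent: prefix sums of [1,2,2,2,1,2,2]
-- # within one octave (1,3,5,7,8,10,12) shifted up 12 per repetition, built once.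
-- _OFFSETS = [12 * octave + step for octave in range(5) for step in (1, 3, 5, 7, 8, 10, 12)]
--
-- def create_phrygian_scale(note):
--     base = note - 24
--     return [base + off for off in _OFFSETS]
-- ===== Notes on version B (the rewrite author's own statement) =====
-- stated objective: simpler
-- what changed: Replaced the nested while-loops maintaining a running note accumulator with a single stateless map over a precomputed constant table of cumulative offsets (prefix sums of the interval pattern, +12 per octave repetition).
import Mathlib
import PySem

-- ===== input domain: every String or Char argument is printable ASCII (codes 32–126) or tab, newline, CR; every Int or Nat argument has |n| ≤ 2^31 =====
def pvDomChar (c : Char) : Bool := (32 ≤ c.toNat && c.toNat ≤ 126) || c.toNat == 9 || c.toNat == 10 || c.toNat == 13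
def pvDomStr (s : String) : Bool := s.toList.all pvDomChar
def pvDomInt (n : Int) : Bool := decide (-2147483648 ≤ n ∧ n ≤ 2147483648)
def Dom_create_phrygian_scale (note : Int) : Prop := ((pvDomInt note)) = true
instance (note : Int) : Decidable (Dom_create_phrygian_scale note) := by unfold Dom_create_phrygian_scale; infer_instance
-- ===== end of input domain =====

-- ===== PORT A =====
-- Literal transliteration of A: outer loop 5 times, inner loop walks majorscale,
-- carrying (note, scale) as the running state and appending the updated note.
def create_phrygian_scale (note : Int) : List Int :=
  let note := note - 24
  let scale : List Int := []
  let majorscale : List Int := [1, 2, 2, 2, 1, 2, 2]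
  let st := (PySem.List.pyRange 0 5 1).foldl
    (fun (st : Int × List Int) _ =>
      majorscale.foldl
        (fun (st2 : Int × List Int) m => (st2.1 + m, st2.2 ++ [st2.1 + m]))
        st)
    (note, scale)
  st.2

-- ===== PORT B =====
-- B: the 35 cumulative offsets are input-independent; build them once and map.
def pvOffsets : List Int :=
  (List.range 5).flatMap (fun octave =>
    ([1, 3, 5, 7, 8, 10, 12] : List Int).map (fun step => 12 * (octave : Int) + step))

def create_phrygian_scale_alt (note : Int) : List Int :=
  let base := note - 24
  pvOffsets.map (fun off => base + off)

-- ===== PRECONDITION & SPEC =====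
def Spec_create_phrygian_scale (note : Int) (out : List Int) : Prop := out = create_phrygian_scale_alt note
instance (note : Int) (out : List Int) : Decidable (Spec_create_phrygian_scale note out) := by unfold Spec_create_phrygian_scale; infer_instance

-- ===== CLAIM (what is proved, stated in full; the proofs are below) =====
def Claim_equal_create_phrygian_scale : Prop := ∀ (note : Int), Dom_create_phrygian_scale note → Spec_create_phrygian_scale note (create_phrygian_scale note)

-- ===== LEMMAS AND PROOFS =====

-- ===== VERDICT (by name: the statement is the Claim_ definition above) =====
theorem pyRange05 : PySem.List.pyRange 0 5 1 = [0, 1, 2, 3, 4] := by decide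

theorem create_phrygian_scale_spec : Claim_equal_create_phrygian_scale := by
  intro note _
  show _ = _
  simp only [create_phrygian_scale, create_phrygian_scale_alt, pvOffsets, pyRange05,
    List.range, List.range.loop, List.flatMap, List.map,
    List.foldl, List.cons_append, List.nil_append,]
  norm_num
  omega
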